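-- pv_equiv track=rewrite | github.com/CatSci/PubChem_ProcessSafety | pubchem_utils.py | make_single
-- ===== SOURCE A (Python) =====
-- def make_single(hazard, data):
--     """_summary_
--
--     Args:
--         hazard {dict}: empty dictionary to store hazard statements.
--         data {dict}: dictionary to store information extracted from website.
--         driver {selenium web driver}: to load the website and extract data.
--
--     Returns:
--         data {dict}: dictionary to store information extracted from website.
--     """
--     string = ''
--     if hazard:
--         last_item = list(hazard)[-1]
--         for item in hazard:
--             if item != last_item:
--                 if '*' in item:
--                     i = item.strip('*')
--                     string += str(i) + ' - ' + str(hazard[item]) + str(' , ')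
--                 else:
--                     string += str(item) + ' - ' + str(hazard[item]) + str(' , ')
--             else:
--                 if '*' in item:
--                     i = item.strip('*')
--                     string += str(i) + ' - ' + str(hazard[item])
--                 else:
--                     string += str(item) + ' - ' + str(hazard[item])
--
--         data['Hazard'] = string
--     else:
--         string = 'Not found'
--         data['Hazard'] = string
--
--     return data
-- ===== SOURCE B (Python) =====
-- def make_single(hazard, data):
--     # Build the result back-to-front over (key, value) pairs: no last-key lookup,
--     # no dict indexing, separator prepended except at the (now first-processed) end.
--     if hazard:
--         s = None
--         for k, v in reversed(list(hazard.items())):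
--             piece = str(k.strip('*')) + ' - ' + str(v)
--             s = piece if s is None else piece + ' , ' + s
--         data['Hazard'] = s
--     else:
--         data['Hazard'] = 'Not found'
--     return data
-- ===== Notes on version B (the rewrite author's own statement) =====
-- stated objective: alternative
-- what changed: Iterates the (key,value) pairs in reverse and builds the string back-to-front by conditional prepending, removing A's last-key computation, per-key dict lookup hazard[item], the last/not-last branching and the redundant '*' membership test.
import Mathlib
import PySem

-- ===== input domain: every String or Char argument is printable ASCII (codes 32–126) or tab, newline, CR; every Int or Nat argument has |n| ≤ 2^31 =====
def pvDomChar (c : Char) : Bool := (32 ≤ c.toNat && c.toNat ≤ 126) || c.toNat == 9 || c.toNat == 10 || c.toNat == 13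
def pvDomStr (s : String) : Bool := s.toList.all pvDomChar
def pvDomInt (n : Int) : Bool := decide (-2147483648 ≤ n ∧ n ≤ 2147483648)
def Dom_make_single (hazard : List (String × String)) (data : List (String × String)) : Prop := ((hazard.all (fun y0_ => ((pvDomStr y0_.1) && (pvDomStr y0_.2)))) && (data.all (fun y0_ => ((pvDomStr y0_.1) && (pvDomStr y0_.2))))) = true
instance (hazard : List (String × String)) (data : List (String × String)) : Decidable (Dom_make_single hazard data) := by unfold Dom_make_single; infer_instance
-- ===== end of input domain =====

-- B builds the string back-to-front over the (key, value) pairs in reverse, prepending the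
-- separator, instead of A's forward accumulation with a last-key lookup, per-key dict
-- indexing and last/not-last branching; objective: alternative (same cost).
-- Both programs set data['Hazard'] in place the same way and return data.

-- ===== PORT A =====
def make_single (hazard : List (String × String)) (data : List (String × String)) : List (String × String) :=
  let string := ""
  if hazard.isEmpty = false then
    -- last_item = list(hazard)[-1]
    let keys := hazard.map Prod.fst
    let last_item := (PySem.List.pyGet? keys (-1)).getD ""   -- keys ≠ [] here, so the getD default never fires
    let string := keys.foldl (fun string item =>
      if item ≠ last_item then
        if PySem.Str.isIn "*" item then
          let i := PySem.Str.stripChars item "*"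
          string ++ i ++ " - " ++ (PySem.Dict.mk hazard).getD item "" ++ " , "
        else
          string ++ item ++ " - " ++ (PySem.Dict.mk hazard).getD item "" ++ " , "
      else
        if PySem.Str.isIn "*" item then
          let i := PySem.Str.stripChars item "*"
          string ++ i ++ " - " ++ (PySem.Dict.mk hazard).getD item ""
        else
          string ++ item ++ " - " ++ (PySem.Dict.mk hazard).getD item "") string
    ((PySem.Dict.mk data).insert "Hazard" string).items
  else
    let string := "Not found"
    ((PySem.Dict.mk data).insert "Hazard" string).items

-- ===== PORT B =====
def make_single_alt (hazard : List (String × String)) (data : List (String × String)) : List (String × String) :=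
  if hazard.isEmpty = false then
    -- for k, v in reversed(list(hazard.items())): s = piece if s is None else piece + ' , ' + s
    let s : Option String := hazard.reverse.foldl (fun (s : Option String) kv =>
      let piece := PySem.Str.stripChars kv.1 "*" ++ " - " ++ kv.2
      match s with
      | none => some piece
      | some t => some (piece ++ " , " ++ t)) none
    ((PySem.Dict.mk data).insert "Hazard" (s.getD "")).items   -- s is never None here: the loop ran at least once
  else
    ((PySem.Dict.mk data).insert "Hazard" "Not found").items

-- ===== PRECONDITION & SPEC =====
-- Pre_ excludes association lists whose hazard keys repeat: a Python dict cannot hold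
-- duplicate keys, so such lists represent no dict input of A.
def Pre_make_single (hazard : List (String × String)) (data : List (String × String)) : Prop :=
  (hazard.map Prod.fst).Nodup
instance (hazard : List (String × String)) (data : List (String × String)) : Decidable (Pre_make_single hazard data) := by unfold Pre_make_single; infer_instance
def pvWitness_make_single : (List (String × String)) × (List (String × String)) :=
  ([("H200*", "explosive"), ("H301", "toxic")], [("CID", "123")])
def Spec_make_single (hazard : List (String × String)) (data : List (String × String)) (out : List (String × String)) : Prop := out = make_single_alt hazard data
instance (hazard : List (String × String)) (data : List (String × String)) (out : List (String × String)) : Decidable (Spec_make_single hazard data out) := by unfold Spec_make_single; infer_instance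

-- ===== CLAIM (what is proved, stated in full; the proofs are below) =====
def Claim_equal_make_single : Prop := ∀ (hazard : List (String × String)) (data : List (String × String)), Dom_make_single hazard data → Pre_make_single hazard data → Spec_make_single hazard data (make_single hazard data)

-- ===== LEMMAS AND PROOFS =====

-- dropWhile whose predicate never fires is the identity
theorem drop_none (l : List Char) (p : Char → Bool) (h : ∀ x ∈ l, p x = false) :
    l.dropWhile p = l :=
  List.dropWhile_eq_self_iff.mpr (by cases l with | nil => simp | cons a t => simp [h a (by simp)])

-- stripping '*' from a string that contains no '*' is the identity
theorem strip_star_noop (k : String) (h : PySem.Str.isIn "*" k = false) :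
    PySem.Str.stripChars k "*" = k := by
  apply String.toList_inj.mp
  rw [PySem.Str.toList_stripChars]
  have hstar : ("*" : String).toList = ['*'] := by decide
  have hch : PySem.Chars.isIn ("*" : String).toList k.toList = false := by
    rw [← PySem.Str.isIn_eq]; exact h
  have hmem : '*' ∉ k.toList := by
    intro hm
    obtain ⟨s, t, h1, -⟩ := List.eq_append_cons_of_mem hm
    have hinf : ("*" : String).toList <:+: k.toList := ⟨s, t, by rw [hstar, h1]; simp⟩
    have htrue := (PySem.Chars.isIn_iff_infix _ _).mpr hinf
    rw [hch] at htrue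
    exact Bool.false_ne_true htrue
  have hfalse : ∀ x ∈ k.toList, (("*" : String).toList.contains x) = false := by
    intro x hx
    rw [hstar]
    simp only [List.contains_eq_mem, List.mem_singleton, decide_eq_false_iff_not]
    intro hxe
    exact hmem (hxe ▸ hx)
  simp only [PySem.Chars.stripChars]
  rw [drop_none _ _ hfalse,
      drop_none _ _ (fun x hx => hfalse x (List.mem_reverse.mp hx)),
      List.reverse_reverse]

-- ' , '.join on a singleton and on a cons with nonempty tail
theorem str_join_singleton (sep p : String) : PySem.Str.join sep [p] = p := by
  apply String.toList_inj.mp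
  rw [PySem.Str.toList_join]
  simp [PySem.Chars.join_singleton]

theorem str_join_cons_cons' (sep p q : String) (rest : List String) :
    PySem.Str.join sep (p :: q :: rest) = p ++ sep ++ PySem.Str.join sep (q :: rest) := by
  apply String.toList_inj.mp
  rw [PySem.Str.toList_join]
  simp [PySem.Chars.join_cons_cons, PySem.Str.toList_join]

theorem str_join_cons_ne (sep p : String) (rest : List String) (h : rest ≠ []) :
    PySem.Str.join sep (p :: rest) = p ++ sep ++ PySem.Str.join sep rest := by
  cases rest with
  | nil => exact absurd rfl h
  | cons q rs => exact str_join_cons_cons' sep p q rs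

-- B's per-pair piece (proof-only abbreviation)
def pieceB (kv : String × String) : String :=
  PySem.Str.stripChars kv.1 "*" ++ " - " ++ kv.2

-- the A-side last-element write equals appending the piece-by-lookup for that key
theorem stepA_piece (hazard : List (String × String)) (s k : String) :
    (if PySem.Str.isIn "*" k then
        s ++ PySem.Str.stripChars k "*" ++ " - " ++ (PySem.Dict.mk hazard).getD k ""
      else
        s ++ k ++ " - " ++ (PySem.Dict.mk hazard).getD k "")
    = s ++ (PySem.Str.stripChars k "*" ++ " - " ++ (PySem.Dict.mk hazard).getD k "") := by
  by_cases h : PySem.Str.isIn "*" k = true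
  · rw [if_pos h]
    simp [String.append_assoc]
  · have hf : PySem.Str.isIn "*" k = false := by simpa using h
    rw [if_neg h, strip_star_noop k hf]
    simp [String.append_assoc]

-- xs[-1] on a list written as init ++ [last]
theorem pyGet_concat_neg_one {α : Type} (init : List α) (last : α) :
    PySem.List.pyGet? (init ++ [last]) (-1) = some last := by
  simp only [PySem.List.pyGet?, PySem.List.pyIdx?, List.length_append, List.length_cons,
    List.length_nil]
  rw [if_neg (by omega), if_pos (by push_cast; omega)]
  simp

-- A's accumulation over init ++ [last] is acc ++ the join of the pieces-by-lookup
theorem fold_eq_join (hazard : List (String × String)) (last : String) :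
    ∀ (init : List String), last ∉ init → ∀ (acc : String),
    (init ++ [last]).foldl (fun string item =>
      if item ≠ last then
        if PySem.Str.isIn "*" item then
          string ++ PySem.Str.stripChars item "*" ++ " - " ++ (PySem.Dict.mk hazard).getD item "" ++ " , "
        else
          string ++ item ++ " - " ++ (PySem.Dict.mk hazard).getD item "" ++ " , "
      else
        if PySem.Str.isIn "*" item then
          string ++ PySem.Str.stripChars item "*" ++ " - " ++ (PySem.Dict.mk hazard).getD item ""
        else
          string ++ item ++ " - " ++ (PySem.Dict.mk hazard).getD item "") acc
    = acc ++ PySem.Str.join " , " ((init ++ [last]).map (fun k =>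
        PySem.Str.stripChars k "*" ++ " - " ++ (PySem.Dict.mk hazard).getD k "")) := by
  intro init
  induction init with
  | nil =>
    intro _ acc
    simp only [List.nil_append, List.foldl_cons, List.foldl_nil, List.map_cons, List.map_nil]
    rw [if_neg (by simp), stepA_piece, str_join_singleton]
  | cons k init ih =>
    intro hmem acc
    have hk : ¬(k = last) := fun hkl => hmem (by simp [hkl])
    have htail : last ∉ init := fun hm => hmem (by simp [hm])
    simp only [List.cons_append, List.foldl_cons, List.map_cons]
    rw [if_pos hk]
    have hacc : (if PySem.Str.isIn "*" k then
          acc ++ PySem.Str.stripChars k "*" ++ " - " ++ (PySem.Dict.mk hazard).getD k "" ++ " , "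
        else
          acc ++ k ++ " - " ++ (PySem.Dict.mk hazard).getD k "" ++ " , ")
        = acc ++ ((PySem.Str.stripChars k "*" ++ " - " ++ (PySem.Dict.mk hazard).getD k "") ++ " , ") := by
      rw [← apply_ite (fun s => s ++ (" , " : String)), stepA_piece]
      simp [String.append_assoc]
    rw [hacc, ih htail, str_join_cons_ne _ _ _ (by simp)]
    simp [String.append_assoc]

-- B's reverse loop with conditional prepend computes the join of the per-pair pieces
theorem revfold_eq_join (l : List (String × String)) (h : l ≠ []) :
    l.reverse.foldl (fun (s : Option String) kv =>
      let piece := PySem.Str.stripChars kv.1 "*" ++ " - " ++ kv.2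
      match s with
      | none => some piece
      | some t => some (piece ++ " , " ++ t)) none
    = some (PySem.Str.join " , " (l.map pieceB)) := by
  induction l with
  | nil => exact absurd rfl h
  | cons kv t ih =>
    cases t with
    | nil => simp [pieceB, str_join_singleton]
    | cons kv' t' =>
      rw [List.reverse_cons, List.foldl_append, ih (by simp)]
      show some (pieceB kv ++ " , " ++ PySem.Str.join " , " (List.map pieceB (kv' :: t'))) = _
      rw [show List.map pieceB (kv :: kv' :: t') = pieceB kv :: pieceB kv' :: List.map pieceB t' from rfl,
        str_join_cons_cons', ← List.map_cons]

-- under nodup keys, the piece-by-lookup over keys equals the per-pair piece over pairs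
theorem map_lookup_eq_map_pair (hazard : List (String × String))
    (hnd : (hazard.map Prod.fst).Nodup) :
    (hazard.map Prod.fst).map (fun k =>
      PySem.Str.stripChars k "*" ++ " - " ++ (PySem.Dict.mk hazard).getD k "")
    = hazard.map pieceB := by
  rw [List.map_map]
  apply List.map_congr_left
  intro kv hkv
  have hkeys : (PySem.Dict.mk hazard).keys.Nodup := by
    simpa [PySem.Dict.keys] using hnd
  have hitems : (kv.1, kv.2) ∈ (PySem.Dict.mk hazard).items := by
    simpa [PySem.Dict.items] using hkv
  have := PySem.Dict.getD_of_mem_items (d := PySem.Dict.mk hazard) hitems hkeys (d0 := "")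
  simp [Function.comp, pieceB, this]

-- ===== VERDICT (by name: the statement is the Claim_ definition above) =====
theorem make_single_spec : Claim_equal_make_single := by
  intro hazard data _ hpre
  simp only [Spec_make_single, make_single, make_single_alt]
  by_cases hE : hazard.isEmpty = false
  · rw [if_pos hE, if_pos hE]
    have hne : hazard ≠ [] := by cases hazard <;> simp_all
    have hkeys : hazard.map Prod.fst ≠ [] := by simp [hne]
    rcases List.eq_nil_or_concat (hazard.map Prod.fst) with hnil | ⟨init, last, hks⟩
    · exact absurd hnil hkeys
    · rw [List.concat_eq_append] at hks
      unfold Pre_make_single at hpre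
      have hnd : (init ++ [last]).Nodup := by rwa [hks] at hpre
      have hmem : last ∉ init := fun hm =>
        ((List.pairwise_append.mp hnd).2.2 last hm last (by simp)) rfl
      rw [revfold_eq_join hazard hne]
      rw [hks, pyGet_concat_neg_one init last]
      simp only [Option.getD_some]
      have hfold := fold_eq_join hazard last init hmem ""
      rw [String.empty_append] at hfold
      have hmap := map_lookup_eq_map_pair hazard hpre
      rw [hks] at hmap
      exact congrArg (fun s => ((PySem.Dict.mk data).insert "Hazard" s).items)
        (hfold.trans (congrArg (PySem.Str.join " , ") hmap))
  · rw [if_neg hE, if_neg hE]
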